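-- pv_equiv track=rewrite | github.com/Francesco-Antonelli/vertex-clustering | utils.py | generate_6_7_from_8_shingle_vec
-- ===== SOURCE A (Python) =====
-- def generate_6_7_from_8_shingle_vec(shingle_vec):
--     H = {}
--     H_temp = {}
--
--     shingle_dict = {shingle_vec: 0}
--
--     for key in shingle_dict:
--         for m in range(8):
--             a = ()
--             for n in range(8):
--                 if m != n:
--                     a = a + (key[n],)
--                 else:
--                     a = a + ("*",)
--             H_temp[a] = 0
--     for key in H_temp.keys():
--         for m in range(8):
--             a = ()
--             for n in range(8):
--                 if m != n:
--                     a = a + (key[n],)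
--                 else:
--                     a = a + ("*",)
--             H[a] = 0
--     H[shingle_vec] = 0
--     return H
-- ===== SOURCE B (Python) =====
-- def generate_6_7_from_8_shingle_vec(shingle_vec):
--     H = {}
--     for p in range(8):
--         H[shingle_vec[:p] + ("*",) + shingle_vec[p + 1:8]] = 0
--         for q in range(p + 1, 8):
--             t = list(shingle_vec[:8])
--             t[p] = "*"
--             t[q] = "*"
--             H[tuple(t)] = 0
--     H[shingle_vec] = 0
--     return H
-- ===== Notes on version B (the rewrite author's own statement) =====
-- stated objective: simpler
-- what changed: B builds the dict in one direct pass, inserting for each position p the single mask at p and then the double masks {p,q} for q>p, eliminating A's H_temp intermediate dict of single masks and its second re-masking loop over H_temp's keys.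
import Mathlib
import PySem

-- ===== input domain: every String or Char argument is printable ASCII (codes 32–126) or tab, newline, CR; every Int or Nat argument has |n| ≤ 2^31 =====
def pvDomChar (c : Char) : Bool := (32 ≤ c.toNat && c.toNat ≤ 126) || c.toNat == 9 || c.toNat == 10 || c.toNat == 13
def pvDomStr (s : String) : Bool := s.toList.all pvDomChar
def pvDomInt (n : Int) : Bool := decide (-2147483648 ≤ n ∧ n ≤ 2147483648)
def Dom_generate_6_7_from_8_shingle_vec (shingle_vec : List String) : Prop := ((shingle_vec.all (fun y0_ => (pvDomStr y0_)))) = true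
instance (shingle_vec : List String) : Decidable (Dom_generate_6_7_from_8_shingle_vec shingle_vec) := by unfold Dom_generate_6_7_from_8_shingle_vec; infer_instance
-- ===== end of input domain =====

-- B replaces A's two-stage masking (an H_temp dict of single masks, then re-masking every
-- H_temp key) by one direct double loop over positions: single mask at p, double masks {p,q}
-- for q > p, original tuple last — simpler, with no intermediate dict.

-- ===== PORT A =====
-- inner 'for n in range(8)' loop of A building one masked tuple
-- (key[n] → pyGetD with default "": the IndexError case is excluded by Pre_)
def pvRowA (key : List String) (m : Int) : List String :=
  (PySem.List.pyRange 0 8 1).foldl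
    (fun a n => if m ≠ n then a ++ [PySem.List.pyGetD key n ""] else a ++ ["*"]) []

def generate_6_7_from_8_shingle_vec (shingle_vec : List String) : List (List String × Int) :=
  let shingle_dict : PySem.Dict (List String) Int := PySem.Dict.empty.insert shingle_vec 0
  let H_temp : PySem.Dict (List String) Int :=
    shingle_dict.keys.foldl (fun Ht key =>
      (PySem.List.pyRange 0 8 1).foldl (fun Ht m => Ht.insert (pvRowA key m) 0) Ht)
      PySem.Dict.empty
  let H : PySem.Dict (List String) Int :=
    H_temp.keys.foldl (fun H key =>
      (PySem.List.pyRange 0 8 1).foldl (fun H m => H.insert (pvRowA key m) 0) H)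
      PySem.Dict.empty
  ((H.insert shingle_vec 0).items)

-- ===== PORT B =====
def generate_6_7_from_8_shingle_vec_alt (shingle_vec : List String) : List (List String × Int) :=
  let H : PySem.Dict (List String) Int :=
    (PySem.List.pyRange 0 8 1).foldl (fun H p =>
      let H := H.insert (PySem.List.slice shingle_vec none (some p) ++ ["*"]
        ++ PySem.List.slice shingle_vec (some (p + 1)) (some 8)) 0
      (PySem.List.pyRange (p + 1) 8 1).foldl (fun H q =>
        H.insert (PySem.List.pySetD (PySem.List.pySetD
          (PySem.List.slice shingle_vec none (some 8)) p "*") q "*") 0) H)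
      PySem.Dict.empty
  ((H.insert shingle_vec 0).items)

-- ===== PRECONDITION & SPEC =====
-- Pre_ excludes exactly the tuples of fewer than 8 elements, on which the Python A
-- raises IndexError (key[n] for n up to 7); B raises IndexError there as well.
def Pre_generate_6_7_from_8_shingle_vec (shingle_vec : List String) : Prop :=
  8 ≤ shingle_vec.length
instance (shingle_vec : List String) : Decidable (Pre_generate_6_7_from_8_shingle_vec shingle_vec) := by
  unfold Pre_generate_6_7_from_8_shingle_vec; infer_instance

def pvWitness_generate_6_7_from_8_shingle_vec : List String :=
  (["a", "b", "c", "d", "e", "f", "g", "h"])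

def Spec_generate_6_7_from_8_shingle_vec (shingle_vec : List String) (out : List (List String × Int)) : Prop := out = generate_6_7_from_8_shingle_vec_alt shingle_vec
instance (shingle_vec : List String) (out : List (List String × Int)) : Decidable (Spec_generate_6_7_from_8_shingle_vec shingle_vec out) := by unfold Spec_generate_6_7_from_8_shingle_vec; infer_instance

-- ===== CLAIM (what is proved, stated in full; the proofs are below) =====
def Claim_equal_generate_6_7_from_8_shingle_vec : Prop := ∀ (shingle_vec : List String), Dom_generate_6_7_from_8_shingle_vec shingle_vec → Pre_generate_6_7_from_8_shingle_vec shingle_vec → Spec_generate_6_7_from_8_shingle_vec shingle_vec (generate_6_7_from_8_shingle_vec shingle_vec)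

-- ===== LEMMAS AND PROOFS =====

-- ---- model: a dict whose values are all 0 is its key list (first-occurrence order) ----
def pvAdd (ks : List (List String)) (k : List String) : List (List String) :=
  if k ∈ ks then ks else ks ++ [k]

def pvAddAll (ks : List (List String)) (l : List (List String)) : List (List String) :=
  l.foldl pvAdd ks

def pvProc (f : List String → List (List String)) (ks : List (List String))
    (keys : List (List String)) : List (List String) :=
  keys.foldl (fun ks k => pvAddAll ks (f k)) ks

def pvToD (ks : List (List String)) : PySem.Dict (List String) Int :=
  ⟨ks.map (fun k => (k, (0 : Int)))⟩

theorem pvAdd_of_mem {ks : List (List String)} {k : List String} (h : k ∈ ks) :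
    pvAdd ks k = ks := by simp [pvAdd, h]

theorem mem_pvAdd_left {ks : List (List String)} {x : List String} (k : List String)
    (h : x ∈ ks) : x ∈ pvAdd ks k := by
  unfold pvAdd; split <;> simp [h]

theorem mem_pvAdd_self (ks : List (List String)) (k : List String) : k ∈ pvAdd ks k := by
  unfold pvAdd; split <;> simp_all

theorem mem_pvAddAll_left {x : List String} (l : List (List String)) :
    ∀ {ks : List (List String)}, x ∈ ks → x ∈ pvAddAll ks l := by
  induction l with
  | nil => intro ks h; exact h
  | cons a l ih => intro ks h; exact ih (mem_pvAdd_left a h)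

theorem mem_pvAddAll_self {x : List String} {l : List (List String)}
    (ks : List (List String)) (h : x ∈ l) : x ∈ pvAddAll ks l := by
  induction l generalizing ks with
  | nil => cases h
  | cons a l ih =>
    rcases List.mem_cons.mp h with rfl | h'
    · exact mem_pvAddAll_left l (mem_pvAdd_self ks x)
    · exact ih (pvAdd ks a) h'

theorem pvAddAll_of_subset {l ks : List (List String)} (h : ∀ x ∈ l, x ∈ ks) :
    pvAddAll ks l = ks := by
  induction l with
  | nil => rfl
  | cons a l ih =>
    show pvAddAll (pvAdd ks a) l = ks
    rw [pvAdd_of_mem (h a (by simp))]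
    exact ih (fun x hx => h x (by simp [hx]))

theorem pvAddAll_append (ks l₁ l₂ : List (List String)) :
    pvAddAll ks (l₁ ++ l₂) = pvAddAll (pvAddAll ks l₁) l₂ :=
  List.foldl_append

theorem pvAddAll_suffix (l : List (List String)) :
    ∀ ks : List (List String), ∃ t, pvAddAll ks l = ks ++ t := by
  induction l with
  | nil => intro ks; exact ⟨[], by simp [pvAddAll]⟩
  | cons a l ih =>
    intro ks
    obtain ⟨t, ht⟩ := ih (pvAdd ks a)
    show ∃ t', pvAddAll (pvAdd ks a) l = ks ++ t'
    by_cases h : a ∈ ks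
    · exact ⟨t, by rwa [pvAdd_of_mem h] at ht ⊢⟩
    · refine ⟨[a] ++ t, ?_⟩
      rw [ht]; simp [pvAdd, h]

theorem pvProc_append (f : List String → List (List String)) (ks l₁ l₂ : List (List String)) :
    pvProc f ks (l₁ ++ l₂) = pvProc f (pvProc f ks l₁) l₂ :=
  List.foldl_append

theorem pvProc_of_inv {f : List String → List (List String)} {keys ks : List (List String)}
    (h : ∀ k ∈ keys, ∀ x ∈ f k, x ∈ ks) : pvProc f ks keys = ks := by
  induction keys with
  | nil => rfl
  | cons a keys ih =>
    show pvProc f (pvAddAll ks (f a)) keys = ks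
    rw [pvAddAll_of_subset (h a (by simp))]
    exact ih (fun k hk x hx => h k (by simp [hk]) x hx)

-- re-processing an already-deduplicated key sequence yields the same dict as processing
-- the raw sequence: A's pass over H_temp.keys = a pass over the raw single-mask sequence
theorem pvProc_skip_seen (f : List String → List (List String)) :
    ∀ (s seen ks : List (List String)),
      (∀ k ∈ seen, ∀ x ∈ f k, x ∈ ks) →
      pvProc f ks (pvAddAll seen s) = pvProc f ks s := by
  intro s
  induction s with
  | nil =>
    intro seen ks h
    show pvProc f ks seen = pvProc f ks []
    rw [pvProc_of_inv h]; rfl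
  | cons k s ih =>
    intro seen ks h
    show pvProc f ks (pvAddAll (pvAdd seen k) s) = pvProc f ks (k :: s)
    have hcons : pvProc f ks (k :: s) = pvProc f (pvAddAll ks (f k)) s := rfl
    by_cases hk : k ∈ seen
    · rw [pvAdd_of_mem hk, ih seen ks h, hcons,
        pvAddAll_of_subset (h k hk)]
    · have hseen : pvAdd seen k = seen ++ [k] := by simp [pvAdd, hk]
      rw [hseen, hcons]
      set ks₁ := pvAddAll ks (f k) with hks₁
      have inv₁ : ∀ j ∈ seen ++ [k], ∀ x ∈ f j, x ∈ ks₁ := by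
        intro j hj x hx
        rcases List.mem_append.mp hj with hj | hj
        · exact mem_pvAddAll_left (f k) (h j hj x hx)
        · simp at hj; subst hj; exact mem_pvAddAll_self ks hx
      obtain ⟨t, ht⟩ := pvAddAll_suffix s (seen ++ [k])
      have hpre : pvProc f ks (seen ++ [k]) = ks₁ := by
        rw [pvProc_append]
        rw [pvProc_of_inv h]
        rfl
      have hpre₁ : pvProc f ks₁ (seen ++ [k]) = ks₁ := pvProc_of_inv inv₁
      have hIH := ih (seen ++ [k]) ks₁ inv₁
      calc pvProc f ks (pvAddAll (seen ++ [k]) s)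
          = pvProc f ks ((seen ++ [k]) ++ t) := by rw [ht]
        _ = pvProc f ks₁ t := by rw [pvProc_append, hpre]
        _ = pvProc f ks₁ ((seen ++ [k]) ++ t) := by rw [pvProc_append, hpre₁]
        _ = pvProc f ks₁ (pvAddAll (seen ++ [k]) s) := by rw [ht]
        _ = pvProc f ks₁ s := hIH

-- ---- lifting the model through PySem.Dict ----
theorem pvToD_insert (ks : List (List String)) (k : List String) :
    (pvToD ks).insert k 0 = pvToD (pvAdd ks k) := by
  have hc : (pvToD ks).contains k = decide (k ∈ ks) := by
    simp [pvToD, PySem.Dict.contains, List.any_map, Function.comp_def, List.any_beq']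
  unfold PySem.Dict.insert
  by_cases h : k ∈ ks
  · rw [hc]; simp only [h, decide_true, if_true, pvAdd_of_mem h]
    unfold pvToD
    congr 1
    rw [List.map_map, List.map_congr_left]
    intro x hx
    simp only [Function.comp_apply]
    by_cases hxk : x = k
    · subst hxk; simp
    · simp [hxk]
  · rw [hc]; simp only [h, decide_false, Bool.false_eq_true, if_false]
    unfold pvToD pvAdd
    simp [h]

theorem pvToD_foldl (l : List (List String)) :
    ∀ ks : List (List String),
      l.foldl (fun d k => d.insert k 0) (pvToD ks) = pvToD (pvAddAll ks l) := by
  induction l with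
  | nil => intro ks; rfl
  | cons a l ih => intro ks; rw [List.foldl_cons, pvToD_insert]; exact ih (pvAdd ks a)

theorem pvToD_keys (ks : List (List String)) : (pvToD ks).keys = ks := by
  simp [pvToD, PySem.Dict.keys, Function.comp_def]

theorem pvToD_empty : (PySem.Dict.empty : PySem.Dict (List String) Int) = pvToD [] := rfl

theorem pvToD_items (ks : List (List String)) :
    (pvToD ks).items = ks.map (fun k => (k, (0 : Int))) := rfl

-- ---- masks ----
def pvN1 (sv : List String) (m : Nat) : List String :=
  (List.range 8).map (fun n => if m ≠ n then sv.getD n "" else "*")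

def pvN2 (sv : List String) (p q : Nat) : List String :=
  (List.range 8).map (fun n => if n = p ∨ n = q then "*" else sv.getD n "")

def pvBlock (key : List String) : List (List String) :=
  (List.range 8).map (pvN1 key)

def pvBlockB (sv : List String) (p : Nat) : List (List String) :=
  pvN1 sv p :: (List.range' (p + 1) (7 - p)).map (fun q => pvN2 sv p q)

theorem pvRange8 : PySem.List.pyRange 0 8 1 = (List.range 8).map (Nat.cast : Nat → Int) := by
  decide

theorem pvRowA_eq (key : List String) (m : Int) :
    pvRowA key m = (PySem.List.pyRange 0 8 1).map
      (fun n => if m ≠ n then PySem.List.pyGetD key n "" else "*") := by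
  unfold pvRowA
  have hfun : (fun (a : List String) (n : Int) =>
      if m ≠ n then a ++ [PySem.List.pyGetD key n ""] else a ++ ["*"])
      = fun a n => a ++ [if m ≠ n then PySem.List.pyGetD key n "" else "*"] := by
    funext a n; split <;> rfl
  rw [hfun, PySem.List.foldl_append_singleton_eq_map, List.nil_append]

theorem pvRowA_natCast (key : List String) (m : Nat) :
    pvRowA key (m : Int) = pvN1 key m := by
  rw [pvRowA_eq, pvRange8, List.map_map]
  unfold pvN1
  apply List.map_congr_left
  intro n _
  simp [Function.comp_apply, Nat.cast_inj]

theorem pvN1_getD (key : List String) (m n : Nat) (hn : n < 8) :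
    (pvN1 key m).getD n "" = if m ≠ n then key.getD n "" else "*" := by
  unfold pvN1
  rw [PySem.List.getD_map_range _ _ _ _ hn]

theorem pvN1_pvN1 (sv : List String) (p m : Nat) :
    pvN1 (pvN1 sv p) m = pvN2 sv p m := by
  show (List.range 8).map (fun n => if m ≠ n then (pvN1 sv p).getD n "" else "*")
      = pvN2 sv p m
  unfold pvN2
  apply List.map_congr_left
  intro n hn
  have hn8 : n < 8 := List.mem_range.mp hn
  rw [pvN1_getD sv p n hn8]
  by_cases h1 : m = n <;> by_cases h2 : p = n <;> simp_all
  rintro (h | h) <;> omega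

theorem pvN2_comm (sv : List String) (p q : Nat) : pvN2 sv p q = pvN2 sv q p := by
  unfold pvN2
  apply List.map_congr_left
  intro n _
  by_cases hp : n = p <;> by_cases hq : n = q <;> simp [hp, hq]

theorem pvN2_self (sv : List String) (p : Nat) : pvN2 sv p p = pvN1 sv p := by
  unfold pvN2 pvN1
  apply List.map_congr_left
  intro n _
  by_cases h : n = p <;> simp [h]; omega

theorem pvBlock_eq_map (sv : List String) (p : Nat) :
    pvBlock (pvN1 sv p) = (List.range 8).map (fun m => pvN2 sv p m) := by
  unfold pvBlock
  exact List.map_congr_left (fun m _ => pvN1_pvN1 sv p m)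

theorem pvBlock_decomp (sv : List String) (p : Nat) (hp : p < 8) :
    pvBlock (pvN1 sv p) = (List.range p).map (fun n => pvN2 sv n p) ++ pvBlockB sv p := by
  rw [pvBlock_eq_map]
  have h8 : List.range 8 = List.range p ++ p :: List.range' (p + 1) (7 - p) := by
    rw [List.range_eq_range']
    rw [show (8 : Nat) = p + ((7 - p) + 1) from by omega]
    rw [← List.range'_append]
    simp [List.range'_succ]
    exact List.range_eq_range'.symm
  rw [h8, List.map_append, List.map_cons]
  unfold pvBlockB
  rw [pvN2_self]
  congr 1
  apply List.map_congr_left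
  intro n hn
  exact pvN2_comm sv p n

-- folding A's inner 8-mask loop = folding the canonical block
theorem pvBlockA_fold (key : List String) (d : PySem.Dict (List String) Int) :
    (PySem.List.pyRange 0 8 1).foldl (fun H m => H.insert (pvRowA key m) 0) d
      = (pvBlock key).foldl (fun H k => H.insert k 0) d := by
  rw [pvRange8, List.foldl_map]
  unfold pvBlock
  rw [List.foldl_map]
  apply PySem.List.foldl_congr_mem
  intro acc m _
  rw [pvRowA_natCast]

theorem pvToD_proc (f : List String → List (List String)) (keys : List (List String)) :
    ∀ ks : List (List String),
      keys.foldl (fun H key => (f key).foldl (fun H k => H.insert k 0) H) (pvToD ks)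
        = pvToD (pvProc f ks keys) := by
  induction keys with
  | nil => intro ks; rfl
  | cons a keys ih =>
    intro ks
    rw [List.foldl_cons, pvToD_foldl]
    exact ih (pvAddAll ks (f a))

-- ---- the core 8-block induction: A's full blocks fold = B's triangular blocks fold ----
theorem pvMain (sv : List String) :
    ∀ (c p : Nat) (ks : List (List String)), p + c = 8 →
      (∀ n q, n < p → q < 8 → pvN2 sv n q ∈ ks) →
      (List.range' p c).foldl (fun ks m => pvAddAll ks (pvBlock (pvN1 sv m))) ks
        = (List.range' p c).foldl (fun ks m => pvAddAll ks (pvBlockB sv m)) ks := by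
  intro c
  induction c with
  | zero => intro p ks _ _; simp [List.range']
  | succ c ih =>
    intro p ks hpc inv
    have hp : p < 8 := by omega
    rw [List.range'_succ, List.foldl_cons, List.foldl_cons]
    have hstep : pvAddAll ks (pvBlock (pvN1 sv p)) = pvAddAll ks (pvBlockB sv p) := by
      rw [pvBlock_decomp sv p hp, pvAddAll_append]
      rw [pvAddAll_of_subset (l := (List.range p).map (fun n => pvN2 sv n p))]
      intro x hx
      obtain ⟨n, hn, rfl⟩ := List.mem_map.mp hx
      exact inv n p (List.mem_range.mp hn) hp
    rw [hstep]
    apply ih (p + 1) _ (by omega)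
    intro n q hn hq
    by_cases hnp : n < p
    · exact mem_pvAddAll_left _ (inv n q hnp hq)
    · have hnp' : n = p := by omega
      subst hnp'
      rcases lt_trichotomy q n with hlt | heq | hgt
      · rw [pvN2_comm]
        exact mem_pvAddAll_left _ (inv q n hlt (by omega))
      · subst heq
        rw [pvN2_self]
        exact mem_pvAddAll_self ks (by simp [pvBlockB])
      · apply mem_pvAddAll_self ks
        unfold pvBlockB
        apply List.mem_cons_of_mem
        exact List.mem_map.mpr ⟨q, by rw [List.mem_range'_1]; omega, rfl⟩

-- ---- A assembled ----
theorem pvA_eq (sv : List String) :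
    generate_6_7_from_8_shingle_vec sv
      = (pvAdd ((List.range' 0 8).foldl (fun ks m => pvAddAll ks (pvBlock (pvN1 sv m))) []) sv).map
          (fun k => (k, (0 : Int))) := by
  simp only [generate_6_7_from_8_shingle_vec]
  rw [pvToD_empty, pvToD_insert]
  rw [show pvAdd [] sv = [sv] from by simp [pvAdd]]
  rw [pvToD_keys]
  rw [List.foldl_cons, List.foldl_nil]
  rw [pvBlockA_fold, pvToD_foldl, pvToD_keys]
  have hinner : (fun (H : PySem.Dict (List String) Int) (key : List String) =>
      (PySem.List.pyRange 0 8 1).foldl (fun H m => H.insert (pvRowA key m) 0) H)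
      = fun H key => (pvBlock key).foldl (fun H k => H.insert k 0) H := by
    funext H key; exact pvBlockA_fold key H
  rw [hinner, pvToD_proc, pvToD_insert, pvToD_items]
  refine congrArg (List.map (fun k => (k, (0 : Int)))) (congrFun (congrArg pvAdd ?_) sv)
  have hskip := pvProc_skip_seen pvBlock (pvBlock sv) [] []
    (by intro k hk; cases hk)
  rw [hskip]
  show pvProc pvBlock [] (pvBlock sv)
      = (List.range' 0 8).foldl (fun ks m => pvAddAll ks (pvBlock (pvN1 sv m))) []
  unfold pvProc pvBlock
  rw [List.foldl_map, List.range_eq_range']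

-- ---- B's mask shapes ----
theorem pvSet1_mask (sv : List String) (p : Nat) (_hp : p < 8) (h8 : 8 ≤ sv.length) :
    (sv.take 8).set p "*" = pvN1 sv p := by
  apply List.ext_getElem
  · simp [pvN1]; omega
  · intro i h1 h2
    have hi : i < 8 := by simpa [pvN1] using h2
    have hilen : i < sv.length := by omega
    rw [List.getElem_set]
    unfold pvN1
    rw [List.getElem_map, List.getElem_range]
    by_cases h : p = i
    · simp [h]
    · simp only [h, if_false]
      rw [if_pos (by omega : p ≠ i)]
      rw [List.getElem_take, List.getD_eq_getElem sv "" hilen]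

theorem pvSet2_mask (sv : List String) (p q : Nat) (_hp : p < 8) (_hq : q < 8)
    (h8 : 8 ≤ sv.length) :
    ((sv.take 8).set p "*").set q "*" = pvN2 sv p q := by
  apply List.ext_getElem
  · simp [pvN2]; omega
  · intro i h1 h2
    have hi : i < 8 := by simpa [pvN2] using h2
    have hilen : i < sv.length := by omega
    rw [List.getElem_set, List.getElem_set]
    unfold pvN2
    rw [List.getElem_map, List.getElem_range]
    by_cases hq' : q = i
    · simp [hq']
    · by_cases hp' : p = i
      · simp [hp', hq']
      · simp only [hq', hp', if_false]
        rw [if_neg (by omega), List.getElem_take, List.getD_eq_getElem sv "" hilen]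

theorem pvSingleB_eq (sv : List String) (p : Nat) (hp : p < 8) (h8 : 8 ≤ sv.length) :
    PySem.List.slice sv none (some (p : Int)) ++ ["*"]
      ++ PySem.List.slice sv (some ((p : Int) + 1)) (some 8) = pvN1 sv p := by
  rw [PySem.List.slice_to_natCast]
  rw [show ((p : Int) + 1) = ((p + 1 : Nat) : Int) from by push_cast; ring]
  rw [show (8 : Int) = ((8 : Nat) : Int) from by norm_num]
  rw [PySem.List.slice_natCast]
  rw [← pvSet1_mask sv p hp h8]
  rw [List.set_eq_take_append_cons_drop, if_pos (by simp [List.length_take]; omega)]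
  rw [List.take_take, List.drop_take]
  rw [show min p 8 = p from by omega]
  simp [List.append_assoc]

theorem pvDoubleB_eq (sv : List String) (p q : Nat) (hp : p < 8) (hq : q < 8)
    (h8 : 8 ≤ sv.length) :
    PySem.List.pySetD (PySem.List.pySetD (PySem.List.slice sv none (some 8))
        (p : Int) "*") (q : Int) "*" = pvN2 sv p q := by
  rw [show (8 : Int) = ((8 : Nat) : Int) from by norm_num, PySem.List.slice_to_natCast]
  have hlen8 : (sv.take 8).length = 8 := by simp; omega
  have h1 : PySem.List.pySetD (sv.take 8) (p : Int) "*" = (sv.take 8).set p "*" := by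
    simp [PySem.List.pySetD, PySem.List.pySet?, PySem.List.pyIdx?, hlen8, hp]
  rw [h1]
  have hlen8' : ((sv.take 8).set p "*").length = 8 := by simp; omega
  have h2 : PySem.List.pySetD ((sv.take 8).set p "*") (q : Int) "*"
      = ((sv.take 8).set p "*").set q "*" := by
    simp [PySem.List.pySetD, PySem.List.pySet?, PySem.List.pyIdx?, hlen8', hq]
  rw [h2]
  exact pvSet2_mask sv p q hp hq h8

theorem pvRangeTail (p : Nat) (hp : p < 8) :
    PySem.List.pyRange ((p : Int) + 1) 8 1
      = (List.range' (p + 1) (7 - p)).map (Nat.cast : Nat → Int) := by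
  interval_cases p <;> decide

-- ---- B assembled ----
theorem pvBstep (sv : List String) (h8 : 8 ≤ sv.length) (H : PySem.Dict (List String) Int)
    (p : Nat) (hp8 : p < 8) :
    (PySem.List.pyRange ((p : Int) + 1) 8 1).foldl (fun H q =>
        H.insert (PySem.List.pySetD (PySem.List.pySetD
          (PySem.List.slice sv none (some 8)) (p : Int) "*") q "*") 0)
      (H.insert (PySem.List.slice sv none (some (p : Int)) ++ ["*"]
        ++ PySem.List.slice sv (some ((p : Int) + 1)) (some 8)) 0)
      = (pvBlockB sv p).foldl (fun H k => H.insert k 0) H := by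
  rw [pvSingleB_eq sv p hp8 h8, pvRangeTail p hp8]
  unfold pvBlockB
  rw [List.foldl_cons, List.foldl_map, List.foldl_map]
  apply PySem.List.foldl_congr_mem
  intro acc q hq
  have hq8 : q < 8 := by rw [List.mem_range'_1] at hq; omega
  rw [pvDoubleB_eq sv p q hp8 hq8 h8]

theorem pvB_eq (sv : List String) (h8 : 8 ≤ sv.length) :
    generate_6_7_from_8_shingle_vec_alt sv
      = (pvAdd ((List.range' 0 8).foldl (fun ks m => pvAddAll ks (pvBlockB sv m)) []) sv).map
          (fun k => (k, (0 : Int))) := by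
  simp only [generate_6_7_from_8_shingle_vec_alt]
  rw [pvRange8]
  simp only [List.foldl_map]
  rw [pvToD_empty]
  have hfold : ∀ (bs : List Nat) (ks : List (List String)), (∀ b ∈ bs, b < 8) →
      bs.foldl (fun H (b : Nat) =>
        (PySem.List.pyRange ((b : Int) + 1) 8 1).foldl (fun H q =>
          H.insert (PySem.List.pySetD (PySem.List.pySetD
            (PySem.List.slice sv none (some 8)) (b : Int) "*") q "*") 0)
          (H.insert (PySem.List.slice sv none (some (b : Int)) ++ ["*"]
            ++ PySem.List.slice sv (some ((b : Int) + 1)) (some 8)) 0)) (pvToD ks)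
        = pvToD (bs.foldl (fun ks b => pvAddAll ks (pvBlockB sv b)) ks) := by
    intro bs
    induction bs with
    | nil => intro ks _; rfl
    | cons b bs ih =>
      intro ks hb
      rw [List.foldl_cons, List.foldl_cons]
      rw [pvBstep sv h8 (pvToD ks) b (hb b (by simp)), pvToD_foldl]
      exact ih (pvAddAll ks (pvBlockB sv b)) (fun x hx => hb x (by simp [hx]))
  rw [hfold (List.range 8) [] (fun b hb => List.mem_range.mp hb)]
  rw [pvToD_insert, pvToD_items, List.range_eq_range']

-- ===== VERDICT (by name: the statement is the Claim_ definition above) =====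
theorem generate_6_7_from_8_shingle_vec_spec : Claim_equal_generate_6_7_from_8_shingle_vec := by
  intro sv _ hpre
  unfold Spec_generate_6_7_from_8_shingle_vec
  have h8 : 8 ≤ sv.length := hpre
  rw [pvA_eq sv, pvB_eq sv h8]
  refine congrArg (List.map (fun k => (k, (0 : Int)))) (congrFun (congrArg pvAdd ?_) sv)
  exact pvMain sv 8 0 [] (by omega) (by intro n q hn _; omega)
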